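-- pv_equiv track=rewrite | github.com/s-ilioukhina/tetris-genetic-algorithm | main.py | totalEmptyTilesSurroundedByEmpty
-- ===== SOURCE A (Python) =====
-- def isWithinGrid(grid, x, y):
-- 	if x >= len(grid) or x < 0 or y >= len(grid[x]) or y < 0:
-- 		return False
-- 	return True
--
-- def totalEmptyTilesSurroundedByEmpty(grid):
-- 	aloneTiles = 0
-- 	for x in range(len(grid)):
-- 		for y in range(len(grid[x])):
-- 			if grid[x][y] == 0:
-- 				pointSum = 0
-- 				ddx = [0, 0, 1, -1, 1, 1, -1, -1]
-- 				ddy = [1, -1, 0, 0, 1, -1, 1, -1]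
-- 				for (dx, dy) in zip(ddx, ddy):
-- 					if isWithinGrid(grid, x+dx, y+dy) and grid[x+dx][y+dy] != 0:
-- 						pointSum += 1
-- 				if pointSum == 0:
-- 					aloneTiles += 1
-- 	return aloneTiles
-- ===== SOURCE B (Python) =====
-- DELTAS = ((0, 1), (0, -1), (1, 0), (-1, 0), (1, 1), (1, -1), (-1, 1), (-1, -1))
--
-- def totalEmptyTilesSurroundedByEmpty(grid):
--     # One pass driven by the FILLED cells: count all empty cells, and mark every
--     # empty in-grid neighbor of a non-empty cell as disqualified (a set, so no
--     # double counting).  Answer = empties - |disqualified|.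
--     empties = 0
--     disqualified = set()
--     for x in range(len(grid)):
--         for y in range(len(grid[x])):
--             if grid[x][y] == 0:
--                 empties += 1
--             else:
--                 for dx, dy in DELTAS:
--                     nx, ny = x + dx, y + dy
--                     if 0 <= nx < len(grid) and 0 <= ny < len(grid[nx]) and grid[nx][ny] == 0:
--                         disqualified.add((nx, ny))
--     return empties - len(disqualified)
-- ===== Notes on version B (the rewrite author's own statement) =====
-- stated objective: alternative
-- what changed: Instead of re-scanning all 8 neighbors of every empty cell, B makes one pass that counts empty cells and, driven by the non-empty cells, marks each empty in-grid neighbor in a set; the answer is empties minus the size of the set.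
import Mathlib
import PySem

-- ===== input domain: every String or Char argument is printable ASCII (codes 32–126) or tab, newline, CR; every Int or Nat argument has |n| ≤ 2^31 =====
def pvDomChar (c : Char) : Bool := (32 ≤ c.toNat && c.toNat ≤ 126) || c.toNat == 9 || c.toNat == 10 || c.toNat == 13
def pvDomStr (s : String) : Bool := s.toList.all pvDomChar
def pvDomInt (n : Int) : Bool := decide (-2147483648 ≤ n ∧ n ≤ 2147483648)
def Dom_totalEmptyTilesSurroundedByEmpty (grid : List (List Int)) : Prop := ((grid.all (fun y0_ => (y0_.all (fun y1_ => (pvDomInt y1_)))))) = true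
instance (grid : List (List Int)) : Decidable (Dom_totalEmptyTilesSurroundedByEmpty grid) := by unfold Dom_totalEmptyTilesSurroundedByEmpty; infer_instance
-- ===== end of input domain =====

-- B replaces A's per-empty-cell neighbor scan by one pass that counts empty cells and, driven by the
-- NON-empty cells, marks each empty in-grid neighbor in a set; answer = empties - |set| (alternative decomposition).

-- ===== PORT A =====
def isWithinGrid (grid : List (List Int)) (x y : Int) : Bool :=
  if (grid.length : Int) ≤ x ∨ x < 0 ∨ ((PySem.List.pyGetD grid x []).length : Int) ≤ y ∨ y < 0 then
    false
  else
    true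

def totalEmptyTilesSurroundedByEmpty (grid : List (List Int)) : Int :=
  (PySem.List.pyRange 0 (grid.length : Int)).foldl (fun aloneTiles x =>
    (PySem.List.pyRange 0 ((PySem.List.pyGetD grid x []).length : Int)).foldl (fun aloneTiles y =>
      if PySem.List.pyGetD (PySem.List.pyGetD grid x []) y 0 == 0 then
        let ddx : List Int := [0, 0, 1, -1, 1, 1, -1, -1]
        let ddy : List Int := [1, -1, 0, 0, 1, -1, 1, -1]
        let pointSum : Int := (ddx.zip ddy).foldl (fun pointSum d =>
          if isWithinGrid grid (x + d.1) (y + d.2) &&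
             (PySem.List.pyGetD (PySem.List.pyGetD grid (x + d.1) []) (y + d.2) 0 != 0) then
            pointSum + 1
          else pointSum) 0
        if pointSum == 0 then aloneTiles + 1 else aloneTiles
      else aloneTiles) aloneTiles) 0

-- ===== PORT B =====
def pvDeltas : List (Int × Int) := [(0, 1), (0, -1), (1, 0), (-1, 0), (1, 1), (1, -1), (-1, 1), (-1, -1)]

def totalEmptyTilesSurroundedByEmpty_alt (grid : List (List Int)) : Int :=
  let st : Int × PySem.Set (Int × Int) :=
    (PySem.List.pyRange 0 (grid.length : Int)).foldl (fun st x =>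
      (PySem.List.pyRange 0 ((PySem.List.pyGetD grid x []).length : Int)).foldl (fun st y =>
        if PySem.List.pyGetD (PySem.List.pyGetD grid x []) y 0 == 0 then
          (st.1 + 1, st.2)
        else
          pvDeltas.foldl (fun st d =>
            if decide (0 ≤ x + d.1) && decide (x + d.1 < (grid.length : Int)) &&
               decide (0 ≤ y + d.2) &&
               decide (y + d.2 < ((PySem.List.pyGetD grid (x + d.1) []).length : Int)) &&
               (PySem.List.pyGetD (PySem.List.pyGetD grid (x + d.1) []) (y + d.2) 0 == 0) then
              (st.1, PySem.Set.add st.2 (x + d.1, y + d.2))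
            else st) st) st) (0, PySem.Set.empty)
  st.1 - (st.2.length : Int)

-- ===== PRECONDITION & SPEC =====
def Spec_totalEmptyTilesSurroundedByEmpty (grid : List (List Int)) (out : Int) : Prop := out = totalEmptyTilesSurroundedByEmpty_alt grid
instance (grid : List (List Int)) (out : Int) : Decidable (Spec_totalEmptyTilesSurroundedByEmpty grid out) := by unfold Spec_totalEmptyTilesSurroundedByEmpty; infer_instance

-- ===== CLAIM (what is proved, stated in full; the proofs are below) =====
def Claim_equal_totalEmptyTilesSurroundedByEmpty : Prop := ∀ (grid : List (List Int)), Dom_totalEmptyTilesSurroundedByEmpty grid → Spec_totalEmptyTilesSurroundedByEmpty grid (totalEmptyTilesSurroundedByEmpty grid)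

-- ===== LEMMAS AND PROOFS =====

-- value at a coordinate (total; only read at in-grid coordinates in the facts below)
def pvVal (grid : List (List Int)) (p : Int × Int) : Int :=
  PySem.List.pyGetD (PySem.List.pyGetD grid p.1 []) p.2 0

-- in-grid test (ragged rows: per-row length)
def pvInG (grid : List (List Int)) (p : Int × Int) : Bool :=
  decide (0 ≤ p.1) && decide (p.1 < (grid.length : Int)) &&
  decide (0 ≤ p.2) && decide (p.2 < ((PySem.List.pyGetD grid p.1 []).length : Int))

def pvC0 (grid : List (List Int)) (p : Int × Int) : Bool := pvVal grid p == 0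

def pvNZ (grid : List (List Int)) (p : Int × Int) : Bool :=
  pvDeltas.any (fun d => pvInG grid (p.1 + d.1, p.2 + d.2) && (pvVal grid (p.1 + d.1, p.2 + d.2) != 0))

def pvIdxs (grid : List (List Int)) : List (Int × Int) :=
  (PySem.List.pyRange 0 (grid.length : Int)).flatMap (fun x =>
    (PySem.List.pyRange 0 ((PySem.List.pyGetD grid x []).length : Int)).map (fun y => (x, y)))

-- the step of B's flattened loop
def pvStepB (grid : List (List Int)) (st : Int × PySem.Set (Int × Int)) (p : Int × Int) :
    Int × PySem.Set (Int × Int) :=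
  if PySem.List.pyGetD (PySem.List.pyGetD grid p.1 []) p.2 0 == 0 then
    (st.1 + 1, st.2)
  else
    pvDeltas.foldl (fun st d =>
      if decide (0 ≤ p.1 + d.1) && decide (p.1 + d.1 < (grid.length : Int)) &&
         decide (0 ≤ p.2 + d.2) &&
         decide (p.2 + d.2 < ((PySem.List.pyGetD grid (p.1 + d.1) []).length : Int)) &&
         (PySem.List.pyGetD (PySem.List.pyGetD grid (p.1 + d.1) []) (p.2 + d.2) 0 == 0) then
        (st.1, PySem.Set.add st.2 (p.1 + d.1, p.2 + d.2))
      else st) st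

lemma pv_foldl_nested {σ : Type} (l : List Int) (f : Int → List Int) (g : σ → Int → Int → σ) (s : σ) :
    l.foldl (fun s x => (f x).foldl (fun s y => g s x y) s) s
      = (l.flatMap (fun x => (f x).map (fun y => (x, y)))).foldl (fun s p => g s p.1 p.2) s := by
  induction l generalizing s with
  | nil => rfl
  | cons x xs ih => simp [List.flatMap_cons, List.foldl_append, List.foldl_map, ih]

lemma pv_mem_idxs (grid : List (List Int)) (p : Int × Int) :
    p ∈ pvIdxs grid ↔ pvInG grid p = true := by
  obtain ⟨a, b⟩ := p
  simp only [pvIdxs, List.mem_flatMap, List.mem_map, PySem.List.mem_pyRange_one, pvInG,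
    Bool.and_eq_true, decide_eq_true_eq, Prod.mk.injEq]
  constructor
  · rintro ⟨x, hx, y, hy, rfl, rfl⟩
    exact ⟨⟨⟨hx.1, hx.2⟩, hy.1⟩, hy.2⟩
  · rintro ⟨⟨⟨h1, h2⟩, h3⟩, h4⟩
    exact ⟨a, ⟨h1, h2⟩, b, ⟨h3, h4⟩, rfl, rfl⟩

lemma pv_nodup_pyRange (n : Nat) : (PySem.List.pyRange 0 (n : Int)).Nodup := by
  rw [PySem.List.pyRange_zero_natCast]
  exact (List.nodup_range).map (fun a b => by exact_mod_cast id)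

lemma pv_nodup_idxs (grid : List (List Int)) : (pvIdxs grid).Nodup := by
  unfold pvIdxs
  rw [List.nodup_flatMap]
  refine ⟨fun x _ => ?_, ?_⟩
  · exact (pv_nodup_pyRange _).map (fun a b h => by simpa using h)
  · refine List.Pairwise.imp ?_ ((pv_nodup_pyRange grid.length))
    intro a b hab q hqa hqb
    simp only [List.mem_map] at hqa hqb
    obtain ⟨y1, _, rfl⟩ := hqa
    obtain ⟨y2, _, h2⟩ := hqb
    exact hab (by simpa using congrArg Prod.fst h2.symm)

lemma pv_neg_mem_deltas (d : Int × Int) (h : d ∈ pvDeltas) : (-d.1, -d.2) ∈ pvDeltas := by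
  fin_cases h <;> decide

lemma pv_iwg (grid : List (List Int)) (x y : Int) :
    isWithinGrid grid x y = pvInG grid (x, y) := by
  rw [Bool.eq_iff_iff]
  simp only [isWithinGrid, pvInG]
  split <;> rename_i h <;> simp <;> omega

-- A's per-cell body counts the cell iff it is empty with no non-empty in-grid neighbor
lemma pv_A_cell (grid : List (List Int)) (x y a : Int) :
    (if PySem.List.pyGetD (PySem.List.pyGetD grid x []) y 0 == 0 then
        let ddx : List Int := [0, 0, 1, -1, 1, 1, -1, -1]
        let ddy : List Int := [1, -1, 0, 0, 1, -1, 1, -1]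
        let pointSum : Int := (ddx.zip ddy).foldl (fun pointSum d =>
          if isWithinGrid grid (x + d.1) (y + d.2) &&
             (PySem.List.pyGetD (PySem.List.pyGetD grid (x + d.1) []) (y + d.2) 0 != 0) then
            pointSum + 1
          else pointSum) 0
        if pointSum == 0 then a + 1 else a
      else a)
      = if pvC0 grid (x, y) && !pvNZ grid (x, y) then a + 1 else a := by
  simp only []
  have hz : (([0, 0, 1, -1, 1, 1, -1, -1] : List Int).zip
      ([1, -1, 0, 0, 1, -1, 1, -1] : List Int)) = pvDeltas := rfl
  rw [hz]
  have hstep : (fun (pointSum : Int) (d : Int × Int) =>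
      if isWithinGrid grid (x + d.1) (y + d.2) &&
         (PySem.List.pyGetD (PySem.List.pyGetD grid (x + d.1) []) (y + d.2) 0 != 0) then
        pointSum + 1
      else pointSum)
      = (fun (pointSum : Int) (d : Int × Int) =>
          if (fun d : Int × Int => pvInG grid (x + d.1, y + d.2) &&
              (pvVal grid (x + d.1, y + d.2) != 0)) d = true then pointSum + 1 else pointSum) := by
    funext ps d
    rw [pv_iwg]
    rfl
  rw [hstep, PySem.List.foldl_count_if]
  have hC : pvC0 grid (x, y) = (PySem.List.pyGetD (PySem.List.pyGetD grid x []) y 0 == 0) := rfl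
  have hN : pvNZ grid (x, y) = pvDeltas.any (fun d => pvInG grid (x + d.1, y + d.2) &&
      (pvVal grid (x + d.1, y + d.2) != 0)) := rfl
  rw [← hC]
  cases h0 : pvC0 grid (x, y) with
  | false => simp
  | true =>
    simp only [if_pos rfl, Bool.true_and, zero_add]
    cases h1 : pvNZ grid (x, y) with
    | false =>
      have : List.countP (fun d => pvInG grid (x + d.1, y + d.2) &&
          (pvVal grid (x + d.1, y + d.2) != 0)) pvDeltas = 0 := by
        rw [List.countP_eq_zero]
        intro d hd
        have := List.any_eq_false.mp (hN ▸ h1) d hd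
        simpa using this
      simp [this]
    | true =>
      have : 0 < List.countP (fun d => pvInG grid (x + d.1, y + d.2) &&
          (pvVal grid (x + d.1, y + d.2) != 0)) pvDeltas := by
        rw [List.countP_pos_iff]
        obtain ⟨d, hd, hcd⟩ := List.any_eq_true.mp (hN ▸ h1)
        exact ⟨d, hd, hcd⟩
      have hne : ((List.countP (fun d => pvInG grid (x + d.1, y + d.2) &&
          (pvVal grid (x + d.1, y + d.2) != 0)) pvDeltas : Int) == 0) = false := by
        simp only [beq_eq_false_iff_ne, ne_eq]
        exact_mod_cast Nat.pos_iff_ne_zero.mp this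
      simp [hne]

-- A's flattened loop counts the empty cells with no non-empty in-grid neighbor
lemma pv_A_eq_count (grid : List (List Int)) :
    totalEmptyTilesSurroundedByEmpty grid
      = ((pvIdxs grid).countP (fun p => pvC0 grid p && !pvNZ grid p) : Int) := by
  unfold totalEmptyTilesSurroundedByEmpty
  rw [pv_foldl_nested]
  have hbody : (fun (a : Int) (p : Int × Int) =>
      (fun (a : Int) (x y : Int) =>
        (if PySem.List.pyGetD (PySem.List.pyGetD grid x []) y 0 == 0 then
            let ddx : List Int := [0, 0, 1, -1, 1, 1, -1, -1]
            let ddy : List Int := [1, -1, 0, 0, 1, -1, 1, -1]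
            let pointSum : Int := (ddx.zip ddy).foldl (fun pointSum d =>
              if isWithinGrid grid (x + d.1) (y + d.2) &&
                 (PySem.List.pyGetD (PySem.List.pyGetD grid (x + d.1) []) (y + d.2) 0 != 0) then
                pointSum + 1
              else pointSum) 0
            if pointSum == 0 then a + 1 else a
          else a)) a p.1 p.2)
      = (fun (a : Int) (p : Int × Int) =>
          if (fun p => pvC0 grid p && !pvNZ grid p) p = true then a + 1 else a) := by
    funext a p
    exact pv_A_cell grid p.1 p.2 a
  rw [show (pvIdxs grid) = (PySem.List.pyRange 0 (grid.length : Int)).flatMap (fun x =>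
      (PySem.List.pyRange 0 ((PySem.List.pyGetD grid x []).length : Int)).map (fun y => (x, y))) from rfl] at *
  rw [hbody, PySem.List.foldl_count_if]
  omega

-- the delta loop of B, named for the proofs
def pvDStep (grid : List (List Int)) (p : Int × Int) (st : Int × PySem.Set (Int × Int))
    (d : Int × Int) : Int × PySem.Set (Int × Int) :=
  if decide (0 ≤ p.1 + d.1) && decide (p.1 + d.1 < (grid.length : Int)) &&
     decide (0 ≤ p.2 + d.2) &&
     decide (p.2 + d.2 < ((PySem.List.pyGetD grid (p.1 + d.1) []).length : Int)) &&
     (PySem.List.pyGetD (PySem.List.pyGetD grid (p.1 + d.1) []) (p.2 + d.2) 0 == 0) then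
    (st.1, PySem.Set.add st.2 (p.1 + d.1, p.2 + d.2))
  else st

lemma pv_dcond (grid : List (List Int)) (p d : Int × Int) :
    (decide (0 ≤ p.1 + d.1) && decide (p.1 + d.1 < (grid.length : Int)) &&
     decide (0 ≤ p.2 + d.2) &&
     decide (p.2 + d.2 < ((PySem.List.pyGetD grid (p.1 + d.1) []).length : Int)) &&
     (PySem.List.pyGetD (PySem.List.pyGetD grid (p.1 + d.1) []) (p.2 + d.2) 0 == 0)) = true
      ↔ pvInG grid (p.1 + d.1, p.2 + d.2) = true ∧ pvVal grid (p.1 + d.1, p.2 + d.2) = 0 := by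
  simp only [pvInG, pvVal, Bool.and_eq_true, decide_eq_true_eq, beq_iff_eq]

lemma pv_dfold_fst (grid : List (List Int)) (p : Int × Int) (ds : List (Int × Int))
    (st : Int × PySem.Set (Int × Int)) : (ds.foldl (pvDStep grid p) st).1 = st.1 := by
  induction ds generalizing st with
  | nil => rfl
  | cons d t ih =>
    rw [List.foldl_cons, ih]
    unfold pvDStep
    split <;> rfl

lemma pv_dfold_mem (grid : List (List Int)) (p : Int × Int) (ds : List (Int × Int))
    (st : Int × PySem.Set (Int × Int)) (q : Int × Int) :
    q ∈ (ds.foldl (pvDStep grid p) st).2 ↔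
      q ∈ st.2 ∨ ∃ d ∈ ds, pvInG grid (p.1 + d.1, p.2 + d.2) = true ∧
        pvVal grid (p.1 + d.1, p.2 + d.2) = 0 ∧ q = (p.1 + d.1, p.2 + d.2) := by
  induction ds generalizing st with
  | nil => simp
  | cons d t ih =>
    rw [List.foldl_cons, ih, List.exists_mem_cons_iff]
    by_cases hc : pvInG grid (p.1 + d.1, p.2 + d.2) = true ∧ pvVal grid (p.1 + d.1, p.2 + d.2) = 0
    · rw [show pvDStep grid p st d = (st.1, PySem.Set.add st.2 (p.1 + d.1, p.2 + d.2)) from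
        if_pos ((pv_dcond grid p d).mpr hc)]
      simp only [PySem.Set.mem_add]
      constructor
      · rintro ((hq | hq) | hex)
        · exact Or.inl hq
        · exact Or.inr (Or.inl ⟨hc.1, hc.2, hq⟩)
        · exact Or.inr (Or.inr hex)
      · rintro (hq | (⟨_, _, h3⟩ | hex))
        · exact Or.inl (Or.inl hq)
        · exact Or.inl (Or.inr h3)
        · exact Or.inr hex
    · rw [show pvDStep grid p st d = st from if_neg (fun hb => hc ((pv_dcond grid p d).mp hb))]
      constructor
      · rintro (hq | hex)
        · exact Or.inl hq
        · exact Or.inr (Or.inr hex)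
      · rintro (hq | (⟨h1, h2, _⟩ | hex))
        · exact Or.inl hq
        · exact absurd ⟨h1, h2⟩ hc
        · exact Or.inr hex

lemma pv_dfold_nodup (grid : List (List Int)) (p : Int × Int) (ds : List (Int × Int))
    (st : Int × PySem.Set (Int × Int)) (h : st.2.Nodup) :
    (ds.foldl (pvDStep grid p) st).2.Nodup := by
  induction ds generalizing st with
  | nil => exact h
  | cons d t ih =>
    rw [List.foldl_cons]
    apply ih
    unfold pvDStep
    split
    · exact PySem.Set.nodup_add _ _ h
    · exact h

lemma pv_stepB_eq (grid : List (List Int)) (st : Int × PySem.Set (Int × Int)) (p : Int × Int) :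
    pvStepB grid st p = if pvC0 grid p = true then (st.1 + 1, st.2)
      else pvDeltas.foldl (pvDStep grid p) st := rfl

lemma pv_foldB_fst (grid : List (List Int)) (l : List (Int × Int)) (st : Int × PySem.Set (Int × Int)) :
    (l.foldl (pvStepB grid) st).1 = st.1 + (l.countP (pvC0 grid) : Int) := by
  induction l generalizing st with
  | nil => simp
  | cons p t ih =>
    rw [List.foldl_cons, ih, pv_stepB_eq, List.countP_cons]
    by_cases h : pvC0 grid p = true
    · simp only [if_pos h, h, if_true]
      push_cast
      ring
    · rw [Bool.not_eq_true] at h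
      simp only [h, Bool.false_eq_true, if_false, pv_dfold_fst]
      push_cast
      ring

lemma pv_foldB_mem (grid : List (List Int)) (l : List (Int × Int)) (st : Int × PySem.Set (Int × Int))
    (q : Int × Int) :
    q ∈ (l.foldl (pvStepB grid) st).2 ↔
      q ∈ st.2 ∨ ∃ p ∈ l, pvC0 grid p = false ∧ ∃ d ∈ pvDeltas,
        pvInG grid (p.1 + d.1, p.2 + d.2) = true ∧ pvVal grid (p.1 + d.1, p.2 + d.2) = 0 ∧
        q = (p.1 + d.1, p.2 + d.2) := by
  induction l generalizing st with
  | nil => simp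
  | cons p t ih =>
    rw [List.foldl_cons, ih, pv_stepB_eq, List.exists_mem_cons_iff]
    by_cases h : pvC0 grid p = true
    · rw [if_pos h]
      constructor
      · rintro (hq | hex)
        · exact Or.inl hq
        · exact Or.inr (Or.inr hex)
      · rintro (hq | (⟨hc, _⟩ | hex))
        · exact Or.inl hq
        · rw [h] at hc; exact absurd hc (by simp)
        · exact Or.inr hex
    · rw [Bool.not_eq_true] at h
      rw [if_neg (by simp [h]), pv_dfold_mem]
      constructor
      · rintro ((hq | ⟨d, hd, hrest⟩) | hex)
        · exact Or.inl hq
        · exact Or.inr (Or.inl ⟨h, d, hd, hrest⟩)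
        · exact Or.inr (Or.inr hex)
      · rintro (hq | (⟨_, d, hd, hrest⟩ | hex))
        · exact Or.inl (Or.inl hq)
        · exact Or.inl (Or.inr ⟨d, hd, hrest⟩)
        · exact Or.inr hex

lemma pv_foldB_nodup (grid : List (List Int)) (l : List (Int × Int)) (st : Int × PySem.Set (Int × Int))
    (h : st.2.Nodup) : (l.foldl (pvStepB grid) st).2.Nodup := by
  induction l generalizing st with
  | nil => exact h
  | cons p t ih =>
    rw [List.foldl_cons]
    apply ih
    rw [pv_stepB_eq]
    split
    · exact h
    · exact pv_dfold_nodup grid p pvDeltas st h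

-- the final set holds exactly the empty in-grid cells with a non-empty in-grid neighbor
lemma pv_set_mem_iff (grid : List (List Int)) (q : Int × Int) :
    q ∈ ((pvIdxs grid).foldl (pvStepB grid) (0, PySem.Set.empty)).2 ↔
      q ∈ (pvIdxs grid).filter (fun p => pvC0 grid p && pvNZ grid p) := by
  rw [pv_foldB_mem, List.mem_filter]
  simp only [PySem.Set.empty, List.not_mem_nil, false_or, Bool.and_eq_true]
  constructor
  · rintro ⟨p, hp, hc, d, hd, hin, hval, rfl⟩
    have hqidx : (p.1 + d.1, p.2 + d.2) ∈ pvIdxs grid := (pv_mem_idxs grid _).mpr hin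
    refine ⟨hqidx, ?_, ?_⟩
    · simp only [pvC0, beq_iff_eq]; exact hval
    · rw [pvNZ, List.any_eq_true]
      refine ⟨(-d.1, -d.2), pv_neg_mem_deltas d hd, ?_⟩
      have he1 : p.1 + d.1 + -d.1 = p.1 := by ring
      have he2 : p.2 + d.2 + -d.2 = p.2 := by ring
      simp only [he1, he2]
      rw [Bool.and_eq_true]
      constructor
      · exact (pv_mem_idxs grid p).mp hp
      · simp only [bne_iff_ne, ne_eq]
        simpa [pvC0, pvVal] using hc
  · rintro ⟨hq, hc0, hnz⟩
    rw [pvNZ, List.any_eq_true] at hnz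
    obtain ⟨d, hd, hcond⟩ := hnz
    rw [Bool.and_eq_true] at hcond
    refine ⟨(q.1 + d.1, q.2 + d.2), (pv_mem_idxs grid _).mpr hcond.1, ?_,
      (-d.1, -d.2), pv_neg_mem_deltas d hd, ?_⟩
    · simp only [pvC0, beq_eq_false_iff_ne, ne_eq]
      simpa [pvVal] using hcond.2
    · have he1 : q.1 + d.1 + -d.1 = q.1 := by ring
      have he2 : q.2 + d.2 + -d.2 = q.2 := by ring
      simp only [he1, he2]
      refine ⟨(pv_mem_idxs grid q).mp hq, ?_, ?_⟩
      · simpa [pvC0, pvVal] using hc0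
      · trivial

lemma pv_B_eq (grid : List (List Int)) :
    totalEmptyTilesSurroundedByEmpty_alt grid
      = ((pvIdxs grid).countP (pvC0 grid) : Int)
        - ((pvIdxs grid).countP (fun p => pvC0 grid p && pvNZ grid p) : Int) := by
  unfold totalEmptyTilesSurroundedByEmpty_alt
  rw [pv_foldl_nested]
  have hstep : (fun (st : Int × PySem.Set (Int × Int)) (p : Int × Int) =>
      (fun (st : Int × PySem.Set (Int × Int)) (x y : Int) =>
        (if PySem.List.pyGetD (PySem.List.pyGetD grid x []) y 0 == 0 then
          (st.1 + 1, st.2)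
        else
          pvDeltas.foldl (fun st d =>
            if decide (0 ≤ x + d.1) && decide (x + d.1 < (grid.length : Int)) &&
               decide (0 ≤ y + d.2) &&
               decide (y + d.2 < ((PySem.List.pyGetD grid (x + d.1) []).length : Int)) &&
               (PySem.List.pyGetD (PySem.List.pyGetD grid (x + d.1) []) (y + d.2) 0 == 0) then
              (st.1, PySem.Set.add st.2 (x + d.1, y + d.2))
            else st) st)) st p.1 p.2)
      = pvStepB grid := rfl
  rw [hstep]
  have hidx : ((PySem.List.pyRange 0 (grid.length : Int)).flatMap (fun x =>
      (PySem.List.pyRange 0 ((PySem.List.pyGetD grid x []).length : Int)).map (fun y => (x, y))))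
      = pvIdxs grid := rfl
  rw [hidx]
  show (List.foldl (pvStepB grid) (0, PySem.Set.empty) (pvIdxs grid)).1
      - ((List.foldl (pvStepB grid) (0, PySem.Set.empty) (pvIdxs grid)).2.length : Int) = _
  rw [pv_foldB_fst]
  have hperm : ((pvIdxs grid).foldl (pvStepB grid) (0, PySem.Set.empty)).2.Perm
      ((pvIdxs grid).filter (fun p => pvC0 grid p && pvNZ grid p)) := by
    rw [List.perm_ext_iff_of_nodup
      (pv_foldB_nodup grid _ _ (by simp [PySem.Set.empty]))
      ((pv_nodup_idxs grid).filter _)]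
    exact fun q => pv_set_mem_iff grid q
  rw [hperm.length_eq, ← List.countP_eq_length_filter]
  simp

lemma pv_count_split (l : List (Int × Int)) (e h : (Int × Int) → Bool) :
    l.countP e = l.countP (fun p => e p && h p) + l.countP (fun p => e p && !h p) := by
  induction l with
  | nil => rfl
  | cons p t ih =>
    simp only [List.countP_cons]
    cases he : e p <;> cases hh : h p <;> simp [he, hh] <;> omega

-- ===== VERDICT (by name: the statement is the Claim_ definition above) =====
theorem totalEmptyTilesSurroundedByEmpty_spec : Claim_equal_totalEmptyTilesSurroundedByEmpty := by
  intro grid _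
  show totalEmptyTilesSurroundedByEmpty grid = totalEmptyTilesSurroundedByEmpty_alt grid
  rw [pv_A_eq_count, pv_B_eq, pv_count_split (pvIdxs grid) (pvC0 grid) (pvNZ grid)]
  push_cast
  ring
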